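-- pv_equiv track=rewrite | github.com/memory-eight-way/memory | quiz/make_quiz.py | proc_txt_lv08_mask_vowel_symbol
-- ===== SOURCE A (Python) =====
-- MASK_CHAR="_"
--
-- FLAG_ANSWER=False
--
-- def get_vowel():
--     """
--     母音を返す
--     """
--     return ["a","i","u","e","o","A","I","U","E","O"]
--
-- def get_all_symbol():
--     """
--     子音を返す
--     """
--     return ["!",'"',".","'","?",":",";","-",",",")","("]
--
-- def get_vowel_symbols():
--     return get_vowel()+get_all_symbol()
--
-- def is_memory_line(line_info):
--     """
--     記憶対象の行かを確認する
--     行番号. 文章 の構成になっているか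
--     """
--     if len(line_info)!=2:
--         # 行番号＋文章の構成でない
--         return False
--
--     if line_info[1].strip()=="":
--         # 行番号＋文章の構成だけど 文章が空
--         return False
--     return True
--
-- def proc_txt_lv08_mask_vowel_symbol(lines,lv):
--     """
--     lv08 母音＋記号をマスクする
--     """
--     w_ret=list()
--
--     w_mask_char=get_vowel_symbols()
--     wcount=0
--
--     for line in lines:
--         line_info=line_to_number_body_pair(line)
--         if is_memory_line(line_info):
--             if FLAG_ANSWER:
--                 w_ret.append(line.strip())
--             w_new_line=line_info[0]+" "+proc_line_mask(line_info[1],w_mask_char)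
--             w_ret.append(w_new_line)
--         else:
--             w_ret.append(line.strip())
--     return w_ret
--
-- def proc_line_mask(line,w_mask_char):
--     wret=list()
--     for wletter in line:
--         if wletter!=" " and wletter in w_mask_char:
--             wret.append(MASK_CHAR)
--         else:
--             wret.append(wletter)
--     return "".join(wret)
--
-- def line_to_number_body_pair(wline):
--     w_word=wline.strip().split(".")
--     w_line_number=w_word[0]+"."
--     w_line_body=".".join(w_word[1:]).strip()
--     return (w_line_number ,w_line_body)
-- ===== SOURCE B (Python) =====
-- _VS = set("aiueoAIUEO!\".'?:;-,)(")
--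
-- def proc_txt_lv08_mask_vowel_symbol(lines, lv):
--     """lv08: mask the WHOLE stripped line up front, then splice head/body at the first dot;
--     no split/rejoin, no per-branch masking — the guard and the body both read the masked copy."""
--     res = []
--     for line in lines:
--         s = line.strip()
--         masked = "".join("_" if c in _VS else c for c in s)
--         i = s.find(".")
--         if i >= 0:
--             body = masked[i + 1:].strip()
--             if body:
--                 res.append(s[:i] + ". " + body)
--                 continue
--         res.append(s)
--     return res
-- ===== Notes on version B (the rewrite author's own statement) =====
-- stated objective: alternative
-- what changed: B inverts the stage order: it masks the entire stripped line once up front, then locates the first '.' with find and splices the unmasked head with the stripped masked tail by index slicing, instead of A's parse-first pipeline (split on '.', rejoin the tail, strip, then mask character by character inside the memory-line branch); correctness rests on masking commuting with strip and preserving non-emptiness.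
import Mathlib
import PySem

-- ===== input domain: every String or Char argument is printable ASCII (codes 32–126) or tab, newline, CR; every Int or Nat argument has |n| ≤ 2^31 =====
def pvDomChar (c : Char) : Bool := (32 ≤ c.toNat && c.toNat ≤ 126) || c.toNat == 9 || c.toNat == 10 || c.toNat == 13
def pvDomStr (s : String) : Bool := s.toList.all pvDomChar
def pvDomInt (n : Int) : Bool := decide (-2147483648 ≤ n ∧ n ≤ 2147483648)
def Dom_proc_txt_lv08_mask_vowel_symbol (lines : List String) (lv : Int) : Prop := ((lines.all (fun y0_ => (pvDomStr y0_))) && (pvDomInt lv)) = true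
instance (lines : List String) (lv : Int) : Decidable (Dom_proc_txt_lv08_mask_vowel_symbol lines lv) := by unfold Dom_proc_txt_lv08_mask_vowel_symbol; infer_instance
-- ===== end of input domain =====

-- B inverts the stage order: it masks the whole stripped line once up front, then finds the first
-- '.' and splices the unmasked head with the stripped masked tail by index slicing (alternative
-- decomposition, same cost; no speed claim).

-- ===== PORT A =====
-- Python: MASK_CHAR="_" (a one-character string, appended per character → a Char here)
def MASK_CHAR : Char := '_'
def FLAG_ANSWER : Bool := false
def get_vowel : List Char := ['a', 'i', 'u', 'e', 'o', 'A', 'I', 'U', 'E', 'O']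
def get_all_symbol : List Char := ['!', '"', '.', '\'', '?', ':', ';', '-', ',', ')', '(']
def get_vowel_symbols : List Char := get_vowel ++ get_all_symbol
-- Python's line_info is always a 2-tuple, so len(line_info)!=2 is the literal (2 ≠ 2) test
def is_memory_line (line_info : List Char × List Char) : Bool :=
  if (2 : Nat) ≠ 2 then false
  else if PySem.Chars.strip line_info.2 = [] then false
  else true
def proc_line_mask (line : List Char) (w_mask_char : List Char) : List Char :=
  line.foldl (fun wret wletter =>
    if wletter ≠ ' ' && w_mask_char.contains wletter then wret ++ [MASK_CHAR]
    else wret ++ [wletter]) []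
def line_to_number_body_pair (wline : String) : List Char × List Char :=
  let w_word := PySem.Chars.splitOn (PySem.Chars.strip wline.toList) ['.']
  let w_line_number := (PySem.List.pyGetD w_word 0 []) ++ ['.']
  let w_line_body := PySem.Chars.strip (PySem.Chars.join ['.'] (PySem.List.slice w_word (some 1) none))
  (w_line_number, w_line_body)
def proc_txt_lv08_mask_vowel_symbol (lines : List String) (lv : Int) : List String :=
  let w_mask_char := get_vowel_symbols
  lines.foldl (fun w_ret line =>
    let line_info := line_to_number_body_pair line
    if is_memory_line line_info then
      let w_ret := if FLAG_ANSWER then w_ret ++ [String.mk (PySem.Chars.strip line.toList)] else w_ret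
      let w_new_line := line_info.1 ++ [' '] ++ proc_line_mask line_info.2 w_mask_char
      w_ret ++ [String.mk w_new_line]
    else
      w_ret ++ [String.mk (PySem.Chars.strip line.toList)]) []

-- ===== PORT B =====
def pvVS : List Char := "aiueoAIUEO!\".'?:;-,)(".toList
-- '"_" if c in _VS else c' applied to every character of the stripped line
def maskAll (cs : List Char) : List Char :=
  cs.map (fun c => if pvVS.contains c then '_' else c)
def proc_txt_lv08_mask_vowel_symbol_alt (lines : List String) (lv : Int) : List String :=
  lines.map (fun line =>
    let s := PySem.Chars.strip line.toList
    let masked := maskAll s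
    let i := PySem.Chars.find s ['.']
    if 0 ≤ i then
      let body := PySem.Chars.strip (PySem.List.slice masked (some (i + 1)) none)
      if body ≠ [] then String.mk (PySem.List.slice s none (some i) ++ '.' :: ' ' :: body)
      else String.mk s
    else String.mk s)

-- ===== PRECONDITION & SPEC =====
def Spec_proc_txt_lv08_mask_vowel_symbol (lines : List String) (lv : Int) (out : List String) : Prop := out = proc_txt_lv08_mask_vowel_symbol_alt lines lv
instance (lines : List String) (lv : Int) (out : List String) : Decidable (Spec_proc_txt_lv08_mask_vowel_symbol lines lv out) := by unfold Spec_proc_txt_lv08_mask_vowel_symbol; infer_instance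

-- ===== CLAIM (what is proved, stated in full; the proofs are below) =====
def Claim_equal_proc_txt_lv08_mask_vowel_symbol : Prop := ∀ (lines : List String) (lv : Int), Dom_proc_txt_lv08_mask_vowel_symbol lines lv → Spec_proc_txt_lv08_mask_vowel_symbol lines lv (proc_txt_lv08_mask_vowel_symbol lines lv)

-- ===== LEMMAS AND PROOFS =====

-- proof-side first-dot splitter (not used by either port)
def partitionDot : List Char → List Char × Bool × List Char
  | [] => ([], false, [])
  | c :: rest =>
    if c = '.' then ([], true, rest)
    else
      let (b, f, a) := partitionDot rest
      (c :: b, f, a)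

-- proof-side model of splitting on a single '.'
def splitD : List Char → List (List Char)
  | [] => [[]]
  | c :: rest =>
    if c = '.' then [] :: splitD rest
    else
      match splitD rest with
      | [] => [[c]]
      | p :: ps => (c :: p) :: ps

def consHead (pre : List Char) : List (List Char) → List (List Char)
  | [] => [pre]
  | p :: ps => (pre ++ p) :: ps

theorem splitD_ne_nil (l : List Char) : splitD l ≠ [] := by
  cases l with
  | nil => simp [splitD]
  | cons c rest =>
    simp only [splitD]
    split
    · simp
    · split <;> simp

theorem splitOn_go_closed (l : List Char) : ∀ (fuel : Nat) (cur : List Char) (acc : List (List Char)),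
    l.length < fuel →
    PySem.Chars.splitOn.go ['.'] fuel l cur acc = acc.reverse ++ consHead cur.reverse (splitD l) := by
  induction l with
  | nil =>
    intro fuel cur acc h
    match fuel with
    | fuel + 1 => simp [PySem.Chars.splitOn.go, splitD, consHead]
  | cons c rest ih =>
    intro fuel cur acc h
    match fuel with
    | fuel + 1 =>
      by_cases hc : c = '.'
      · subst hc
        rw [show PySem.Chars.splitOn.go ['.'] (fuel + 1) ('.' :: rest) cur acc
              = PySem.Chars.splitOn.go ['.'] fuel rest [] (cur.reverse :: acc) by
            simp [PySem.Chars.splitOn.go, List.isPrefixOf]]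
        rw [ih fuel [] (cur.reverse :: acc) (by simpa using Nat.lt_of_succ_lt_succ h)]
        obtain ⟨p, ps, hps⟩ := List.exists_cons_of_ne_nil (splitD_ne_nil rest)
        simp [splitD, consHead, hps]
      · rw [show PySem.Chars.splitOn.go ['.'] (fuel + 1) (c :: rest) cur acc
              = PySem.Chars.splitOn.go ['.'] fuel rest (c :: cur) acc by
            simp only [PySem.Chars.splitOn.go, List.isPrefixOf, Bool.and_eq_true, beq_iff_eq]
            rw [if_neg]
            simp [eq_comm, hc]]
        rw [ih fuel (c :: cur) acc (by simpa using Nat.lt_of_succ_lt_succ h)]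
        obtain ⟨p, ps, hps⟩ := List.exists_cons_of_ne_nil (splitD_ne_nil rest)
        simp [splitD, consHead, hc, hps]

theorem splitOn_eq_splitD (l : List Char) : PySem.Chars.splitOn l ['.'] = splitD l := by
  show PySem.Chars.splitOn.go ['.'] (l.length + 1) l [] [] = splitD l
  rw [splitOn_go_closed l (l.length + 1) [] [] (Nat.lt_succ_self _)]
  obtain ⟨p, ps, hps⟩ := List.exists_cons_of_ne_nil (splitD_ne_nil l)
  rw [hps]
  rfl

theorem splitD_partition (l : List Char) :
    splitD l = (partitionDot l).1 ::
      (if (partitionDot l).2.1 then splitD (partitionDot l).2.2 else []) := by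
  induction l with
  | nil => simp [splitD, partitionDot]
  | cons c rest ih =>
    by_cases hc : c = '.'
    · subst hc; simp [splitD, partitionDot]
    · simp only [splitD, partitionDot, hc, if_false]
      rw [ih]

theorem join_splitD (l : List Char) : PySem.Chars.join ['.'] (splitD l) = l := by
  induction l with
  | nil => simp [splitD, PySem.Chars.join, List.intercalate]
  | cons c rest ih =>
    obtain ⟨p, ps, hps⟩ := List.exists_cons_of_ne_nil (splitD_ne_nil rest)
    by_cases hc : c = '.'
    · subst hc
      rw [splitD, if_pos rfl, hps, PySem.Chars.join_cons_cons, ← hps, ih]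
      simp
    · rw [splitD]
      simp only [hc, if_false, hps]
      cases ps with
      | nil =>
        have hr : p = rest := by
          simpa [hps, PySem.Chars.join_singleton] using ih
        simp [PySem.Chars.join_singleton, hr]
      | cons q qs =>
        rw [PySem.Chars.join_cons_cons]
        have h2 := ih
        rw [hps, PySem.Chars.join_cons_cons] at h2
        rw [← h2]
        simp

-- structure of partitionDot
theorem partitionDot_true (s b a : List Char) (h : partitionDot s = (b, true, a)) :
    s = b ++ '.' :: a ∧ '.' ∉ b := by
  induction s generalizing b a with
  | nil => simp [partitionDot] at h
  | cons c rest ih =>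
    by_cases hc : c = '.'
    · subst hc
      simp [partitionDot] at h
      obtain ⟨hb, ha⟩ := h
      subst hb; subst ha; simp
    · rcases hpd : partitionDot rest with ⟨b', f', a'⟩
      simp [partitionDot, hc, hpd] at h
      obtain ⟨hb, hf, ha⟩ := h
      subst hf; subst ha
      obtain ⟨h1, h2⟩ := ih b' a' hpd
      subst hb
      refine ⟨by simp [h1], ?_⟩
      intro hm
      rcases List.mem_cons.mp hm with he | he
      · exact hc he.symm
      · exact h2 he

theorem partitionDot_false (s b a : List Char) (h : partitionDot s = (b, false, a)) :
    b = s ∧ '.' ∉ s := by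
  induction s generalizing b a with
  | nil =>
    simp [partitionDot] at h
    simp [h.1]
  | cons c rest ih =>
    by_cases hc : c = '.'
    · subst hc; simp [partitionDot] at h
    · rcases hpd : partitionDot rest with ⟨b', f', a'⟩
      simp [partitionDot, hc, hpd] at h
      obtain ⟨hb, hf, ha⟩ := h
      subst hf; subst ha
      obtain ⟨h1, h2⟩ := ih b' a' hpd
      subst hb; subst h1
      refine ⟨rfl, ?_⟩
      intro hm
      rcases List.mem_cons.mp hm with he | he
      · exact hc he.symm
      · exact h2 he

theorem infix_singleton_iff (c : Char) (s : List Char) : [c] <:+: s ↔ c ∈ s := by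
  constructor
  · rintro ⟨p, q, hpq⟩
    rw [← hpq]; simp
  · intro hm
    obtain ⟨p, q, hpq⟩ := List.append_of_mem hm
    exact ⟨p, q, by simp [hpq]⟩

theorem find_dot_true (s b a : List Char) (h : partitionDot s = (b, true, a)) :
    PySem.Chars.find s ['.'] = (b.length : Int) := by
  obtain ⟨hs, hb⟩ := partitionDot_true s b a h
  have hin : ['.'] <:+: s := (infix_singleton_iff '.' s).mpr (by simp [hs])
  have hge : 0 ≤ PySem.Chars.find s ['.'] := (PySem.Chars.find_nonneg_iff _ _).mpr hin
  obtain ⟨hpre, hmin⟩ := PySem.Chars.find_spec (s := s) (sub := ['.']) hge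
  set t := (PySem.Chars.find s ['.']).toNat with ht
  have hdropb : s.drop b.length = '.' :: a := by simp [hs]
  have hle : t ≤ b.length := by
    by_contra hlt
    exact hmin b.length (by omega) (by rw [hdropb]; simp)
  have hge2 : b.length ≤ t := by
    by_contra hlt
    push_neg at hlt
    obtain ⟨r, hr⟩ := hpre
    have hidx : s[t]? = some '.' := by
      have h0 : (s.drop t)[0]? = some '.' := by rw [← hr]; simp
      simpa using h0
    have hidx2 : s[t]? = b[t]? := by
      rw [hs]
      exact List.getElem?_append_left hlt
    have : '.' ∈ b := by
      apply List.mem_of_getElem? (i := t)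
      rw [← hidx2, hidx]
    exact hb this
  have heq : t = b.length := le_antisymm hle hge2
  rw [← Int.toNat_of_nonneg hge, ← ht, heq]

theorem find_dot_false (s b a : List Char) (h : partitionDot s = (b, false, a)) :
    PySem.Chars.find s ['.'] = -1 := by
  obtain ⟨_, hnm⟩ := partitionDot_false s b a h
  exact (PySem.Chars.find_eq_neg_one_iff _ _).mpr (fun hi => hnm ((infix_singleton_iff '.' s).mp hi))

-- masking does not change which characters are whitespace
theorem isspace_mask (c : Char) :
    PySem.Chars.isspace (if pvVS.contains c then '_' else c) = PySem.Chars.isspace c := by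
  by_cases h : c ∈ pvVS
  · have hall : pvVS.all (fun d => !PySem.Chars.isspace d) = true := by decide
    have hc : PySem.Chars.isspace c = false := by
      have := List.all_eq_true.mp hall c h
      simpa using this
    have h' : (if pvVS.contains c then '_' else c) = '_' := by simp [h]
    rw [h', hc]
    decide
  · have h' : (if pvVS.contains c then '_' else c) = c := by simp [h]
    rw [h']

theorem strip_maskAll (l : List Char) :
    PySem.Chars.strip (maskAll l) = maskAll (PySem.Chars.strip l) := by
  have hdw : ∀ (m : List Char),
      List.dropWhile PySem.Chars.isspace (maskAll m)
        = maskAll (List.dropWhile PySem.Chars.isspace m) := by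
    intro m
    rw [maskAll, List.dropWhile_map, maskAll]
    have hp : (PySem.Chars.isspace ∘ fun c => if pvVS.contains c then '_' else c)
        = PySem.Chars.isspace := by
      funext c
      simpa [Function.comp] using isspace_mask c
    rw [hp]
  rw [PySem.Chars.strip, PySem.Chars.strip, PySem.Chars.lstrip, PySem.Chars.rstrip,
      PySem.Chars.lstrip, PySem.Chars.rstrip, hdw]
  rw [show (maskAll (List.dropWhile PySem.Chars.isspace l)).reverse
        = maskAll (List.dropWhile PySem.Chars.isspace l).reverse by
    simp [maskAll]]
  rw [hdw]
  simp [maskAll]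

-- strip is idempotent
theorem dropWhile_rev_drop (p : Char → Bool) (t : List Char)
    (h : List.dropWhile p t = t) :
    List.dropWhile p ((List.dropWhile p t.reverse).reverse) = (List.dropWhile p t.reverse).reverse := by
  have hpre : (List.dropWhile p t.reverse).reverse <+: t := by
    have hs := List.dropWhile_suffix (l := t.reverse) p
    have := hs.reverse
    simpa using this
  rw [List.dropWhile_eq_self_iff]
  intro hl
  have h0 := hpre.getElem (i := 0) hl
  rw [h0]
  exact (List.dropWhile_eq_self_iff.mp h) _

theorem rstrip_rstrip (t : List Char) : PySem.Chars.rstrip (PySem.Chars.rstrip t) = PySem.Chars.rstrip t := by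
  simp [PySem.Chars.rstrip, List.dropWhile_idempotent]

theorem lstrip_rstrip_lstrip (s : List Char) :
    PySem.Chars.lstrip (PySem.Chars.rstrip (PySem.Chars.lstrip s)) = PySem.Chars.rstrip (PySem.Chars.lstrip s) := by
  have h : List.dropWhile PySem.Chars.isspace (PySem.Chars.lstrip s) = PySem.Chars.lstrip s := by
    simp [PySem.Chars.lstrip, List.dropWhile_idempotent]
  simpa [PySem.Chars.lstrip, PySem.Chars.rstrip] using dropWhile_rev_drop _ _ h

theorem strip_strip (s : List Char) : PySem.Chars.strip (PySem.Chars.strip s) = PySem.Chars.strip s := by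
  rw [PySem.Chars.strip, PySem.Chars.strip, lstrip_rstrip_lstrip, rstrip_rstrip]

theorem strip_nil : PySem.Chars.strip [] = [] := by
  simp [PySem.Chars.strip, PySem.Chars.lstrip, PySem.Chars.rstrip]

theorem mask_eq (cs : List Char) :
    proc_line_mask cs get_vowel_symbols = maskAll cs := by
  rw [proc_line_mask, maskAll]
  rw [show (fun wret wletter =>
        if wletter ≠ ' ' && get_vowel_symbols.contains wletter then wret ++ [MASK_CHAR]
        else wret ++ [wletter])
      = fun (wret : List Char) wletter => wret ++ [if pvVS.contains wletter then '_' else wletter] by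
    funext wret c
    have htab : get_vowel_symbols = pvVS := by decide
    rw [htab]
    by_cases h : c = ' '
    · subst h
      have hsp : ¬ (' ' ∈ pvVS) := by decide
      simp [hsp]
    · by_cases hm : c ∈ pvVS <;> simp [MASK_CHAR, h, hm]]
  exact PySem.List.foldl_append_singleton_eq_map _ cs []

-- the two per-line transforms
def aLine (line : String) : String :=
  let line_info := line_to_number_body_pair line
  if is_memory_line line_info then
    String.mk (line_info.1 ++ [' '] ++ proc_line_mask line_info.2 get_vowel_symbols)
  else String.mk (PySem.Chars.strip line.toList)

theorem aLine_eq (line : String) :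
    aLine line =
      (let s := PySem.Chars.strip line.toList
       let masked := maskAll s
       let i := PySem.Chars.find s ['.']
       if 0 ≤ i then
         let body := PySem.Chars.strip (PySem.List.slice masked (some (i + 1)) none)
         if body ≠ [] then String.mk (PySem.List.slice s none (some i) ++ '.' :: ' ' :: body)
         else String.mk s
       else String.mk s) := by
  rw [aLine, line_to_number_body_pair]
  set s := PySem.Chars.strip line.toList with hcs
  rcases hpd : partitionDot s with ⟨b, f, a⟩
  have hsplit : PySem.Chars.splitOn s ['.'] = b :: (if f then splitD a else []) := by
    rw [splitOn_eq_splitD, splitD_partition, hpd]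
  cases f with
  | false =>
    have hfind : PySem.Chars.find s ['.'] = -1 := find_dot_false s b a hpd
    simp only [hsplit, hfind, PySem.List.pyGetD_zero_cons, PySem.List.slice_from_one, List.tail_cons]
    simp [is_memory_line, strip_nil]
  | true =>
    obtain ⟨hs, _⟩ := partitionDot_true s b a hpd
    have hfind : PySem.Chars.find s ['.'] = (b.length : Int) := find_dot_true s b a hpd
    have htake : PySem.List.slice s none (some ((b.length : Nat) : Int)) = b := by
      rw [PySem.List.slice_to_natCast, hs]
      simp
    have hdropgen : ∀ (f : Char → Char) (l r : List Char) (x : Char),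
        List.drop (l.length + 1) (List.map f l ++ x :: List.map f r) = List.map f r := by
      intro f l r x
      induction l with
      | nil => simp
      | cons c cs ih => simpa using ih
    have hdrop : PySem.List.slice (maskAll s) (some (((b.length + 1 : Nat)) : Int)) none = maskAll a := by
      rw [PySem.List.slice_from_natCast, hs]
      simp only [maskAll, List.map_append, List.map_cons]
      exact hdropgen _ b a _
    simp only [hsplit, if_true, PySem.List.pyGetD_zero_cons, PySem.List.slice_from_one,
      List.tail_cons, join_splitD, hfind]
    rw [show ((b.length : Int) + 1) = (((b.length + 1 : Nat)) : Int) by push_cast; ring]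
    rw [hdrop, htake, strip_maskAll]
    by_cases hb : PySem.Chars.strip a = []
    · simp [is_memory_line, hb, strip_nil, maskAll]
    · have hss : PySem.Chars.strip (PySem.Chars.strip a) = PySem.Chars.strip a := strip_strip a
      have hmb : maskAll (PySem.Chars.strip a) ≠ [] := by
        simp [maskAll, hb]
      simp [is_memory_line, hss, hb, hmb, mask_eq]

theorem foldl_A_eq_map (lines : List String) (lv : Int) :
    proc_txt_lv08_mask_vowel_symbol lines lv = lines.map aLine := by
  rw [proc_txt_lv08_mask_vowel_symbol]
  rw [show (fun (w_ret : List String) line =>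
      let line_info := line_to_number_body_pair line
      if is_memory_line line_info then
        let w_ret := if FLAG_ANSWER then w_ret ++ [String.mk (PySem.Chars.strip line.toList)] else w_ret
        let w_new_line := line_info.1 ++ [' '] ++ proc_line_mask line_info.2 get_vowel_symbols
        w_ret ++ [String.mk w_new_line]
      else
        w_ret ++ [String.mk (PySem.Chars.strip line.toList)])
    = fun (w_ret : List String) line => w_ret ++ [aLine line] by
    funext acc line
    rw [aLine]
    by_cases h : is_memory_line (line_to_number_body_pair line) <;> simp [FLAG_ANSWER, h]]
  exact PySem.List.foldl_append_singleton_eq_map _ lines []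

-- ===== VERDICT (by name: the statement is the Claim_ definition above) =====
theorem proc_txt_lv08_mask_vowel_symbol_spec : Claim_equal_proc_txt_lv08_mask_vowel_symbol := by
  intro lines lv _
  show proc_txt_lv08_mask_vowel_symbol lines lv = proc_txt_lv08_mask_vowel_symbol_alt lines lv
  rw [foldl_A_eq_map lines lv, proc_txt_lv08_mask_vowel_symbol_alt]
  exact List.map_congr_left (fun line _ => aLine_eq line)
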